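-- pv_equiv track=rewrite | github.com/s4piru/DeepPeryax | frontend.py | unescape_state
-- ===== SOURCE A (Python) =====
-- def unescape_move(move):
--     move = move.replace("at", "@")
--     move = move.replace("p", "+")
--     move = move.replace("s", "/")
--     move = move.replace("b", "\\")
--     return move
--
-- def unescape_state(state):
--     moves = state.split("_")
--     com_first = (moves[0] == "W")
--     moves = moves[1:]
--     if len(moves) > 0 and moves[-1] == "FIN":
--         moves = moves[:-1]
--     moves = [unescape_move(move) for move in moves]
--     return com_first, moves
-- ===== SOURCE B (Python) =====
-- _TABLE = {'p': '+', 's': '/', 'b': '\\'}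
--
-- def _unescape_move(move):
--     out = []
--     i = 0
--     n = len(move)
--     while i < n:
--         if move.startswith("at", i):
--             out.append("@")
--             i += 2
--         else:
--             c = move[i]
--             out.append(_TABLE.get(c, c))
--             i += 1
--     return "".join(out)
--
-- def unescape_state(state):
--     moves = state.split("_")
--     com_first = (moves[0] == "W")
--     body = moves[1:]
--     if body and body[-1] == "FIN":
--         body.pop()
--     return com_first, [_unescape_move(m) for m in body]
-- ===== Notes on version B (the rewrite author's own statement) =====
-- stated objective: alternative
-- what changed: The per-move unescaping is rewritten from four sequential full-string .replace scans to a single left-to-right pass that checks for 'at' at each position and otherwise substitutes the character through a lookup table.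
import Mathlib
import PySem

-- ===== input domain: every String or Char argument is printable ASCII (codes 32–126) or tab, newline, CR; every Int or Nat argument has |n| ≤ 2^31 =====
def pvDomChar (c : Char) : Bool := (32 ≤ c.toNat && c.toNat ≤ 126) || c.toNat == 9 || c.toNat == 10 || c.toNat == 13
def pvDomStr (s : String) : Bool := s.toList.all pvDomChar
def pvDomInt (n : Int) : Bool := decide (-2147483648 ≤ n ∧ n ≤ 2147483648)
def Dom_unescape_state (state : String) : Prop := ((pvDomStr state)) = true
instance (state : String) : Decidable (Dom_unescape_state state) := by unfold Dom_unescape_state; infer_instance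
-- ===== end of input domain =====

-- B replaces unescape_move's four sequential full-string .replace scans by one left-to-right
-- table-driven pass; the return values are proved equal (objective: alternative).

-- ===== PORT A =====
-- A's unescape_move: four sequential replaces (worked on List Char; PySem.Str.replace is
-- definitionally PySem.Chars.replace on .toList)
def aMove (m : List Char) : List Char :=
  PySem.Chars.replace
    (PySem.Chars.replace
      (PySem.Chars.replace
        (PySem.Chars.replace m ['a','t'] ['@'])
        ['p'] ['+'])
      ['s'] ['/'])
    ['b'] ['\\']

def unescape_state (state : String) : Bool × List String :=
  let moves := PySem.Chars.splitOn state.toList ['_']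
  let com_first := PySem.List.pyGet? moves 0 == some ['W']   -- moves[0] == "W" (split never yields [], so moves[0] never raises)
  let moves := PySem.List.slice moves (some 1) none
  let moves :=
    if moves.length > 0 ∧ PySem.List.pyGet? moves (-1) == some ['F','I','N'] then
      PySem.List.slice moves none (some (-1))
    else moves
  (com_first, (moves.map aMove).map String.ofList)

-- ===== PORT B =====
-- B's character table {'p':'+','s':'/','b':'\\'}.get(c, c)
def bTab (c : Char) : Char :=
  PySem.Dict.getD (PySem.Dict.ofList [('p','+'),('s','/'),('b','\\')]) c c

-- B's single left-to-right scan of one move (startswith "at" at i, else table lookup)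
def bMove : List Char → List Char
  | [] => []
  | [c] => [bTab c]
  | c :: d :: rest =>
    if c = 'a' ∧ d = 't' then '@' :: bMove rest
    else bTab c :: bMove (d :: rest)

def unescape_state_alt (state : String) : Bool × List String :=
  let moves := PySem.Chars.splitOn state.toList ['_']
  let com_first := PySem.List.pyGet? moves 0 == some ['W']
  let body := moves.drop 1
  let body :=
    if body ≠ [] ∧ body.getLast? = some ['F','I','N'] then body.dropLast else body
  (com_first, body.map (fun m => String.ofList (bMove m)))

-- ===== PRECONDITION & SPEC =====
def Spec_unescape_state (state : String) (out : Bool × List String) : Prop := out = unescape_state_alt state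
instance (state : String) (out : Bool × List String) : Decidable (Spec_unescape_state state out) := by unfold Spec_unescape_state; infer_instance

-- ===== CLAIM (what is proved, stated in full; the proofs are below) =====
def Claim_equal_unescape_state : Prop := ∀ (state : String), Dom_unescape_state state → Spec_unescape_state state (unescape_state state)

-- ===== LEMMAS AND PROOFS =====

-- proof-only mirror of A's first replace ("at" → "@") as one pass
def atPass : List Char → List Char
  | [] => []
  | [c] => [c]
  | c :: d :: rest =>
    if c = 'a' ∧ d = 't' then '@' :: atPass rest
    else c :: atPass (d :: rest)

theorem replace_single_go (c d : Char) :
    ∀ fuel (l acc : List Char), l.length ≤ fuel →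
      PySem.Chars.replace.go [c] [d] fuel l acc
        = acc.reverse ++ l.map (fun x => if x = c then d else x) := by
  intro fuel
  induction fuel with
  | zero => intro l acc h; simp at h; simp [h, PySem.Chars.replace.go]
  | succ n ih =>
    intro l acc h
    cases l with
    | nil => simp [PySem.Chars.replace.go]
    | cons x t =>
      rw [PySem.Chars.replace.go]
      by_cases hx : x = c
      · simp [hx, List.isPrefixOf, ih t _ (by simpa using h)]
      · have : List.isPrefixOf [c] (x :: t) = false := by
          simp [List.isPrefixOf]; exact fun hc => (hx hc.symm).elim
        simp [this, hx, ih t _ (by simpa using h)]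

theorem replace_single (c d : Char) (l : List Char) :
    PySem.Chars.replace l [c] [d] = l.map (fun x => if x = c then d else x) := by
  rw [PySem.Chars.replace]
  simp [replace_single_go c d l.length l [] le_rfl]

theorem replace_at_go :
    ∀ fuel (l acc : List Char), l.length ≤ fuel →
      PySem.Chars.replace.go ['a','t'] ['@'] fuel l acc = acc.reverse ++ atPass l := by
  intro fuel
  induction fuel using Nat.strong_induction_on with
  | _ fuel ih =>
    intro l acc h
    match fuel, l with
    | 0, l =>
      have hl : l = [] := by simpa [List.length_eq_zero_iff] using h
      simp [hl, PySem.Chars.replace.go, atPass]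
    | n+1, [] => simp [PySem.Chars.replace.go, atPass]
    | n+1, [x] =>
      rw [PySem.Chars.replace.go]
      have hp : List.isPrefixOf ['a','t'] [x] = false := by simp [List.isPrefixOf]
      rw [hp]
      simp only [Bool.false_eq_true, if_false]
      rw [ih n (by omega) [] _ (by simp)]
      simp [atPass]
    | n+1, x :: y :: t =>
      rw [PySem.Chars.replace.go]
      by_cases hx : x = 'a' ∧ y = 't'
      · have hp : List.isPrefixOf ['a','t'] (x :: y :: t) = true := by
          simp [List.isPrefixOf, hx.1, hx.2]
        rw [hp]
        simp only [if_true, List.length_cons, List.drop_succ_cons, List.length_nil,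
          List.drop]
        rw [ih n (by omega) t _ (by simp at h; omega)]
        simp [atPass, hx]
      · have hp : List.isPrefixOf ['a','t'] (x :: y :: t) = false := by
          simp [List.isPrefixOf]
          intro h1 h2; exact hx ⟨h1.symm, h2.symm⟩
        rw [hp]
        simp only [Bool.false_eq_true, if_false]
        rw [ih n (by omega) (y :: t) _ (by simp at h ⊢; omega)]
        simp [atPass, hx]

theorem replace_at (l : List Char) :
    PySem.Chars.replace l ['a','t'] ['@'] = atPass l := by
  rw [PySem.Chars.replace]
  simp [replace_at_go l.length l [] le_rfl]

-- the three single-char replaces compose to B's table lookup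
theorem comp_eq_bTab (x : Char) :
    (if (if (if x = 'p' then '+' else x) = 's' then '/' else (if x = 'p' then '+' else x)) = 'b'
      then '\\'
      else (if (if x = 'p' then '+' else x) = 's' then '/' else (if x = 'p' then '+' else x)))
      = bTab x := by
  by_cases hp : x = 'p'
  · simp [hp, bTab]; decide
  · by_cases hs : x = 's'
    · simp [hs, bTab]; decide
    · by_cases hb : x = 'b'
      · simp [hb, bTab]; decide
      · simp only [hp, hs, hb, if_false]
        unfold bTab
        rw [PySem.Dict.getD, show PySem.Dict.ofList [('p','+'),('s','/'),('b','\\')]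
              = PySem.Dict.mk [('p','+'),('s','/'),('b','\\')] from by decide]
        rw [PySem.Dict.get?_mk_cons, PySem.Dict.get?_mk_cons, PySem.Dict.get?_mk_cons]
        have h1 : ('p' == x) = false := by simp [Ne.symm hp]
        have h2 : ('s' == x) = false := by simp [Ne.symm hs]
        have h3 : ('b' == x) = false := by simp [Ne.symm hb]
        simp [h1, h2, h3, PySem.Dict.get?]

theorem map_bTab_atPass (l : List Char) : (atPass l).map bTab = bMove l := by
  induction l using atPass.induct with
  | case1 => simp [atPass, bMove]
  | case2 c => simp [atPass, bMove]
  | case3 c d rest h ih => simp [atPass, bMove, h, ih]; decide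
  | case4 c d rest h ih => simp [atPass, bMove, h, ih]

theorem aMove_eq_bMove (m : List Char) : aMove m = bMove m := by
  unfold aMove
  rw [replace_at, replace_single, replace_single, replace_single,
    List.map_map, List.map_map]
  rw [← map_bTab_atPass]
  apply List.map_congr_left
  intro x _
  exact comp_eq_bTab x

theorem unescape_state_spec : Claim_equal_unescape_state := by
  intro state _
  unfold Spec_unescape_state unescape_state unescape_state_alt
  simp only [PySem.List.slice_from_one, PySem.List.slice_to_neg_one,
    PySem.List.pyGet?_neg_one, List.map_map, ← List.drop_one]
  have hmap : ∀ (l : List (List Char)),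
      l.map (String.ofList ∘ aMove) = l.map (fun m => String.ofList (bMove m)) := by
    intro l
    apply List.map_congr_left
    intro m _
    simp [Function.comp, aMove_eq_bMove]
  have hcond : ∀ (l : List (List Char)),
      (l.length > 0 ∧ (l.getLast? == some ['F','I','N']) = true)
        ↔ (l ≠ [] ∧ l.getLast? = some ['F','I','N']) := by
    intro l
    constructor
    · rintro ⟨h1, h2⟩
      exact ⟨List.ne_nil_of_length_pos h1, by simpa using h2⟩
    · rintro ⟨h1, h2⟩
      exact ⟨List.length_pos_of_ne_nil h1, by simpa using h2⟩
  rw [if_congr (hcond _) rfl rfl]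
  split_ifs with h
  · simp [hmap]
  · simp [hmap]
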